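-- pv_equiv track=rewrite | github.com/joshanashakya/dissertation | workspace/dataset/java-python/GeeksForGeeks/1263/A/2.py | findLargestCubeUtil
-- ===== SOURCE A (Python) =====
-- def findLargestCubeUtil(num,preProcessedCubes):
--
--     # reverse the preProcessed cubes so
--     # that we have the largest cube in
--     # the beginning of the vector
--     preProcessedCubes = preProcessedCubes[::-1]
--
--     totalCubes = len(preProcessedCubes)
--
--     # iterate over all cubes
--     for i in range(totalCubes):
--         currCube = preProcessedCubes[i]
--
--         digitsInCube = len(currCube)
--         index = 0
--         digitsInNumber = len(num)
--         for j in range(digitsInNumber):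
--
--             # check if the current digit of the cube
--             # matches with that of the number num
--             if (num[j] == currCube[index]):
--                 index += 1
--
--             if (digitsInCube == index):
--                 return currCube
--
--     # if control reaches here, the its
--     # not possible to form a perfect cube
--     return "Not Possible"
-- ===== SOURCE B (Python) =====
-- def findLargestCubeUtil(num, preProcessedCubes):
--     # Precompute, for every start position p of num, a map sending each
--     # character to the smallest index >= p where it occurs; every cube is
--     # then tested with O(len(cube)) dictionary jumps instead of a scan of num.
--     cur = {}
--     tables = [cur]
--     for i, ch in reversed(list(enumerate(num))):
--         cur = dict(cur)
--         cur[ch] = i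
--         tables.append(cur)
--     tables.reverse()  # tables[p][ch] = first index >= p with num[index] == ch
--     for cube in reversed(preProcessedCubes):
--         pos = 0
--         for ch in cube:
--             j = tables[pos].get(ch)
--             if j is None:
--                 break
--             pos = j + 1
--         else:
--             return cube
--     return "Not Possible"
-- ===== Notes on version B (the rewrite author's own statement) =====
-- stated objective: faster
-- what changed: Instead of rescanning the whole number once per cube, B precomputes a next-occurrence table (for each position of num, a map from character to its first occurrence at or after that position) and then tests each cube as a subsequence with O(len(cube)) dictionary jumps.
-- outside the precondition, e.g. on findLargestCubeUtil('', ['']): A returns 'Not Possible', B returns ''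
import Mathlib
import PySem

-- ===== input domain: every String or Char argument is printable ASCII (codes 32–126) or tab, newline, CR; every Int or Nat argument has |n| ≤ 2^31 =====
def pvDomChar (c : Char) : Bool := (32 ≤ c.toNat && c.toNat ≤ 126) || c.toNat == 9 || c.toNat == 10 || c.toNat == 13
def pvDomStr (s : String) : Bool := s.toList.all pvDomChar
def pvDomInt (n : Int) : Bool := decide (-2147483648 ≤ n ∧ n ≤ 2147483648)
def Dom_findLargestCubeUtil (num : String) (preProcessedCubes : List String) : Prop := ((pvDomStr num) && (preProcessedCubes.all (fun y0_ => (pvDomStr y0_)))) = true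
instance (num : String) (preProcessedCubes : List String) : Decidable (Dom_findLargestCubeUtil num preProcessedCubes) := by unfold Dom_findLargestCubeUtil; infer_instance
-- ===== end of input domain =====

-- B replaces A's per-cube rescan of num by a precomputed next-occurrence table
-- (per position, char -> first occurrence at or after it), testing each cube in
-- O(len(cube)) lookups; objective: faster.

-- ===== PORT A =====
-- inner 'for j in range(digitsInNumber)' loop with early return; state = index.
-- currCube[index] is ported via get?; for a nonempty cube (Pre_) index is always
-- in range exactly as in the Python.
def pvInnerA (cube : List Char) : List Char → Nat → Bool
  | [], _ => false
  | x :: xs, index =>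
    let index' := if cube[index]? = some x then index + 1 else index
    if cube.length = index' then true else pvInnerA cube xs index'

-- outer 'for i in range(totalCubes)' loop over the reversed list, early return
def pvOuterA (num : List Char) : List String → String
  | [] => "Not Possible"
  | c :: rest => if pvInnerA c.toList num 0 then c else pvOuterA num rest

def findLargestCubeUtil (num : String) (preProcessedCubes : List String) : String :=
  -- preProcessedCubes[::-1] is exactly List.reverse
  pvOuterA num.toList preProcessedCubes.reverse

-- ===== PORT B =====
-- building step of the table loop: cur = dict(cur); cur[ch] = i; tables.append(cur)
-- (PySem.Dict.insert is persistent, so the explicit Python copy is the identity here)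
def pvStepB (st : PySem.Dict Char Int × List (PySem.Dict Char Int)) (p : Int × Char) :
    PySem.Dict Char Int × List (PySem.Dict Char Int) :=
  let cur := st.1.insert p.2 p.1
  (cur, st.2 ++ [cur])

-- the 'for ch in cube' loop with for-else: True iff the loop never breaks
def pvWalkB (tables : List (PySem.Dict Char Int)) : List Char → Int → Bool
  | [], _ => true
  | ch :: cs, pos =>
    match PySem.List.pyGet? tables pos with
    | none => false            -- IndexError; unreachable since 0 ≤ pos ≤ len(num)
    | some t =>
      match t.get? ch with
      | none => false          -- j is None: break
      | some j => pvWalkB tables cs (j + 1)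

-- 'for cube in reversed(preProcessedCubes)' with early return
def pvOuterB (tables : List (PySem.Dict Char Int)) : List String → String
  | [] => "Not Possible"
  | c :: rest => if pvWalkB tables c.toList 0 then c else pvOuterB tables rest

def findLargestCubeUtil_alt (num : String) (preProcessedCubes : List String) : String :=
  let st := ((PySem.List.enumerate num.toList 0).reverse).foldl pvStepB
      (PySem.Dict.empty, [PySem.Dict.empty])
  let tables := st.2.reverse
  pvOuterB tables preProcessedCubes.reverse

-- ===== PRECONDITION & SPEC =====
-- Pre_ excludes lists containing the empty string: when A's scan reaches an empty
-- cube it raises IndexError on currCube[index] for nonempty num (and for empty num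
-- its skipping of the empty cube is an artefact of the unreachable length check,
-- where B naturally returns '' since an empty subsequence always matches); whether
-- the empty cube is reached depends on the earlier cubes, so every such list is
-- excluded.
def Pre_findLargestCubeUtil (num : String) (preProcessedCubes : List String) : Prop :=
  ∀ c ∈ preProcessedCubes, c ≠ ""
instance (num : String) (preProcessedCubes : List String) : Decidable (Pre_findLargestCubeUtil num preProcessedCubes) := by unfold Pre_findLargestCubeUtil; infer_instance

def pvWitness_findLargestCubeUtil : String × List String := ("4125", ["1", "125"])

def Spec_findLargestCubeUtil (num : String) (preProcessedCubes : List String) (out : String) : Prop := out = findLargestCubeUtil_alt num preProcessedCubes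
instance (num : String) (preProcessedCubes : List String) (out : String) : Decidable (Spec_findLargestCubeUtil num preProcessedCubes out) := by unfold Spec_findLargestCubeUtil; infer_instance

-- ===== CLAIM (what is proved, stated in full; the proofs are below) =====
def Claim_equal_findLargestCubeUtil : Prop := ∀ (num : String) (preProcessedCubes : List String), Dom_findLargestCubeUtil num preProcessedCubes → Pre_findLargestCubeUtil num preProcessedCubes → Spec_findLargestCubeUtil num preProcessedCubes (findLargestCubeUtil num preProcessedCubes)

-- ===== LEMMAS AND PROOFS =====

-- reference greedy subsequence test both ports are reduced to
def pvGreedy : List Char → List Char → Bool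
  | [], _ => true
  | c :: cs, s =>
    match s.findIdx? (· == c) with
    | none => false
    | some k => pvGreedy cs (s.drop (k + 1))

-- spec table for the suffix of num starting at absolute position q
def pvTsuf : List Char → Int → PySem.Dict Char Int
  | [], _ => PySem.Dict.empty
  | x :: xs, q => (pvTsuf xs (q + 1)).insert x q

-- spec list of tables [T_q, T_{q+1}, …, T_end]
def pvSpecList : List Char → Int → List (PySem.Dict Char Int)
  | [], _ => [PySem.Dict.empty]
  | x :: xs, q => pvTsuf (x :: xs) q :: pvSpecList xs (q + 1)

theorem pvFoldB (s : List Char) (q : Int) :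
    ((PySem.List.enumerate s q).reverse).foldl pvStepB (PySem.Dict.empty, [PySem.Dict.empty])
      = (pvTsuf s q, (pvSpecList s q).reverse) := by
  induction s generalizing q with
  | nil => simp [PySem.List.enumerate_nil, pvTsuf, pvSpecList]
  | cons x xs ih =>
    rw [PySem.List.enumerate_cons]
    simp only [List.reverse_cons, List.foldl_append, ih (q + 1), List.foldl_cons, List.foldl_nil]
    simp [pvStepB, pvTsuf, pvSpecList]

theorem pvTsuf_get (s : List Char) (q : Int) (ch : Char) :
    (pvTsuf s q).get? ch = (s.findIdx? (· == ch)).map (fun k : Nat => q + (k : Int)) := by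
  induction s generalizing q with
  | nil => simp [pvTsuf]
  | cons x xs ih =>
    simp only [pvTsuf, List.findIdx?_cons, PySem.Dict.get?_insert]
    by_cases h : ch = x
    · simp [h]
    · have hx : (x == ch) = false := by simp [Ne.symm h]
      cases hfi : xs.findIdx? (· == ch) with
      | none => simp [h, hx, ih, hfi]
      | some k => simp [h, hx, ih, hfi]; ring

theorem pvSpecList_get (s : List Char) (q : Int) (k : Nat) (hk : k ≤ s.length) :
    (pvSpecList s q)[k]? = some (pvTsuf (s.drop k) (q + k)) := by
  induction s generalizing q k with
  | nil => simp at hk; subst hk; simp [pvSpecList, pvTsuf]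
  | cons x xs ih =>
    cases k with
    | zero => simp [pvSpecList]
    | succ n =>
      have := ih (q + 1) n (by simpa using hk)
      simp only [pvSpecList, List.getElem?_cons_succ, List.drop_succ_cons, this]
      congr 2
      push_cast; ring

theorem pvWalk_eq_greedy (L : List Char) (cube : List Char) (p : Nat) (hp : p ≤ L.length) :
    pvWalkB (pvSpecList L 0) cube (p : Int) = pvGreedy cube (L.drop p) := by
  induction cube generalizing p with
  | nil => simp [pvWalkB, pvGreedy]
  | cons ch cs ih =>
    have hget : PySem.List.pyGet? (pvSpecList L 0) (p : Int) = some (pvTsuf (L.drop p) ((0:Int) + p)) := by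
      rw [PySem.List.pyGet?_natCast, pvSpecList_get L 0 p hp]
    cases hfi : (L.drop p).findIdx? (· == ch) with
    | none =>
      simp only [pvWalkB, hget, pvTsuf_get, hfi]
      simp [pvGreedy, hfi]
    | some k =>
      have hk : k < (L.drop p).length := by
        have := List.findIdx?_eq_some_iff_findIdx_eq.mp hfi; omega
      have hk' : p + k + 1 ≤ L.length := by
        rw [List.length_drop] at hk; omega
      have hcast : ((0:Int) + ↑p + ↑k) + 1 = ((p + k + 1 : Nat) : Int) := by push_cast; ring
      simp only [pvWalkB, hget, pvTsuf_get, hfi, Option.map_some, hcast, ih (p + k + 1) hk']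
      simp only [pvGreedy, hfi]
      rw [List.drop_drop, show p + (k + 1) = p + k + 1 by omega]

theorem pvGreedy_cons (c x : Char) (cs xs : List Char) :
    pvGreedy (c :: cs) (x :: xs) = if x = c then pvGreedy cs xs else pvGreedy (c :: cs) xs := by
  by_cases h : x = c
  · simp [pvGreedy, List.findIdx?_cons, h]
  · have hx : (x == c) = false := by simp [h]
    cases hfi : xs.findIdx? (· == c) with
    | none => simp [pvGreedy, List.findIdx?_cons, hx, hfi, h]
    | some k => simp [pvGreedy, List.findIdx?_cons, hx, hfi, h]

theorem pvInner_eq_greedy (cube : List Char) (num : List Char) (index : Nat)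
    (h : index < cube.length) :
    pvInnerA cube num index = pvGreedy (cube.drop index) num := by
  induction num generalizing index with
  | nil =>
    rw [List.drop_eq_getElem_cons h]
    simp [pvInnerA, pvGreedy]
  | cons x xs ih =>
    rw [List.drop_eq_getElem_cons h, pvGreedy_cons]
    have hget : cube[index]? = some cube[index] := List.getElem?_eq_getElem h
    by_cases heq : cube[index] = x
    · have hc : cube[index]? = some x := by rw [hget, heq]
      by_cases hlen : cube.length = index + 1
      · simp [pvInnerA, hlen, heq]
        have : cube.drop (index + 1) = [] := by rw [List.drop_eq_nil_iff]; omega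
        simp [this, pvGreedy]
      · have hlt : index + 1 < cube.length := by omega
        simp [pvInnerA, hc, hlen, heq, ih (index + 1) hlt]
    · have hc : ¬ (cube[index]? = some x) := by rw [hget]; simp [heq]
      have hlen : ¬ (cube.length = index) := by omega
      simp only [pvInnerA, if_neg hc, if_neg hlen, ih index h]
      rw [List.drop_eq_getElem_cons h, if_neg (fun hh => heq hh.symm)]

theorem pvOuter_eq (L : List Char) (cubes : List String) (h : ∀ c ∈ cubes, c ≠ "") :
    pvOuterA L cubes = pvOuterB (pvSpecList L 0) cubes := by
  induction cubes with
  | nil => rfl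
  | cons c rest ih =>
    have hc : c.toList ≠ [] := by
      intro hl; exact h c (List.mem_cons_self) (by rwa [String.toList_eq_nil_iff] at hl)
    have h0 : 0 < c.toList.length := List.length_pos_iff.mpr hc
    have e1 : pvInnerA c.toList L 0 = pvGreedy c.toList L := by
      simpa using pvInner_eq_greedy c.toList L 0 h0
    have e2 : pvWalkB (pvSpecList L 0) c.toList 0 = pvGreedy c.toList L := by
      simpa using pvWalk_eq_greedy L c.toList 0 (Nat.zero_le _)
    simp only [pvOuterA, pvOuterB, e1, e2,
      ih (fun c' hc' => h c' (List.mem_cons_of_mem _ hc'))]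

-- ===== VERDICT (by name: the statement is the Claim_ definition above) =====
theorem findLargestCubeUtil_spec : Claim_equal_findLargestCubeUtil := by
  intro num cubes _ hpre
  unfold Spec_findLargestCubeUtil findLargestCubeUtil findLargestCubeUtil_alt
  rw [pvFoldB]
  simp only [List.reverse_reverse]
  exact pvOuter_eq num.toList cubes.reverse (fun c hc => hpre c (List.mem_reverse.mp hc))
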